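/-
  COMPOSING THE CHANGES TO THE TOKEN ARRAY  (lemmas for Json/Jsmn/CorrectValue.lean).

  `Inside ts a k`: the state of the token array while the loop is inside the object or array with token index `a`, `k` tokens allocated:
  `a` is open, every token after it is closed (and, with parent links, the parent chain of each leads down to `a`).
  Placed.append      two pieces of text one after the other under the same superior token
  Placed.container   `[` + elements + `]` make one piece
  Inside.extend      after a piece of text inside `a`, the loop is still inside `a`
-/
import Json.Jsmn.CorrectBracket
import Json.Jsmn.ExpectedFacts

namespace Jsmn
open Json

/-- Inside the object or array with token `a`, with `k` tokens allocated. -/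
structure Inside (cfg : Config) (ts : Tokens) (a k : Nat) : Prop where
  lt : a < k
  isOpen : (ts.getD a default).isOpen = true
  closed : ∀ i, a < i → i < k → (ts.getD i default).isOpen = false
  parents : cfg.parentLinks = true → ∀ i, a < i → i < k → (a : Int) ≤ (ts.getD i default).parent ∧ (ts.getD i default).parent < i

theorem St.ext' {pos pos' k k' : Nat} {sup sup' : Int} {toks toks' : Option Tokens} {c c' : Int} (h1 : pos = pos') (h2 : k = k')
    (h3 : sup = sup') (h4 : toks = toks') (h5 : c = c') : (⟨⟨pos, k, sup⟩, toks, c⟩ : St) = ⟨⟨pos', k', sup'⟩, toks', c'⟩ := by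
  subst h1 h2 h3 h4 h5; rfl

theorem Reaches.cast {cfg : Config} {js : List UInt8} {n : Nat} {s s' s'' : St} (h : Reaches cfg js n s s') (e : s' = s'') :
    Reaches cfg js n s s'' := e ▸ h

theorem Placed.cast {cfg : Config} {ts ts' : Tokens} {sup : Int} {m m' : Int} {k : Nat} {new new' : List Token}
    (h : Placed cfg ts ts' sup m k new) (e1 : m = m') (e2 : new = new') : Placed cfg ts ts' sup m' k new' := e1 ▸ e2 ▸ h

/-- Two pieces one after the other. -/
theorem Placed.append {cfg : Config} {ts ts1 ts2 : Tokens} {sup : Int} {m1 m2 : Int} {k : Nat} {A B : List Token}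
    (h1 : Placed cfg ts ts1 sup m1 k A) (h2 : Placed cfg ts1 ts2 sup m2 (k + A.length) B) (hsup : ∀ a : Nat, sup = a → a < k) :
    Placed cfg ts ts2 sup (m1 + m2) k (A ++ B) := by
  refine ⟨h2.len.trans h1.len, fun a ha => ?_, fun j hj => ?_, fun i hi hik => ?_⟩
  · rw [h2.sup_eq a ha, h1.sup_eq a ha]; simp only [Token.mk.injEq, true_and, and_true]; omega
  · by_cases hjA : j < A.length
    · rw [getD_append_left _ _ _ hjA, h2.other (k + j) (fun h => by have := hsup _ h.symm; omega) (Or.inl (by omega)), h1.new_eq j hjA]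
    · rw [getD_append_right _ _ _ (by omega)]
      have := h2.new_eq (j - A.length) (by simp at hj; omega)
      rw [show k + A.length + (j - A.length) = k + j by omega] at this
      rw [this, h1.other (k + j) (fun h => by have := hsup _ h.symm; omega) (Or.inr (by omega))]
  · rw [h2.other i hi (by simp at hik; omega), h1.other i hi (by simp at hik; omega)]

/-- Nothing placed, nothing changed. -/
theorem Placed.nil (cfg : Config) (ts : Tokens) (sup : Int) (k : Nat) : Placed cfg ts ts sup 0 k [] :=
  ⟨rfl, fun a _ => by simp, fun j hj => by simp at hj, fun _ _ _ => rfl⟩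

/-- `[` (the open token stored at `k`: `h1`), then the elements (`h2`, their superior being `k`), then `]` (which sets the end). -/
theorem Placed.container {cfg : Config} {ts tsb tsc : Tokens} {sup : Int} {m : Int} {k : Nat} {ty : Nat} {s e : Int} {new : List Token}
    (h1 : Placed cfg ts tsb sup 1 k [⟨ty, s, -1, 0, sup⟩]) (h2 : Placed cfg tsb tsc k m (k + 1) new) (hsup : ∀ a : Nat, sup = a → a < k)
    (hk : k < ts.length) :
    Placed cfg ts (tsc.set k { tsc.getD k default with «end» := e }) sup 1 k (⟨ty, s, e, m, sup⟩ :: new) := by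
  have hlen : tsc.length = ts.length := h2.len.trans h1.len
  refine ⟨by simp [hlen], fun a ha => ?_, fun j hj => ?_, fun i hi hik => ?_⟩
  · have hak := hsup a ha
    rw [getD_set_other _ _ (by omega), h2.other a (by omega) (Or.inl (by omega)), h1.sup_eq a ha]
  · cases j with
    | zero =>
      have hb := h1.new_eq 0 (by simp)
      simp only [Nat.add_zero, List.getD_cons_zero] at hb ⊢
      rw [getD_set_self _ _ (by omega), h2.sup_eq k rfl, hb]
      cases hl : cfg.parentLinks <;> simp [stampTok, hl]
    | succ j =>
      simp only [List.getD_cons_succ]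
      have := h2.new_eq j (by simpa using hj)
      rw [show k + (j + 1) = k + 1 + j by omega, getD_set_other _ _ (by omega), this,
        h1.other (k + 1 + j) (fun h => by have := hsup _ h.symm; omega) (Or.inr (by simp))]
  · have hne : i ≠ k := by
      rcases hik with h | h
      · omega
      · simp at h; omega
    rw [getD_set_other _ _ hne, h2.other i (by omega) (by simp at hik; omega), h1.other i hi (by simp at hik ⊢; omega)]

/-- A key (stored at `k`: `h1`), then its value (`h2`, its superior being the key). -/
theorem Placed.member {cfg : Config} {ts tsb tsc : Tokens} {sup : Int} {m : Int} {k : Nat} {ty : Nat} {s e : Int} {new : List Token}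
    (h1 : Placed cfg ts tsb sup 1 k [⟨ty, s, e, 0, sup⟩]) (h2 : Placed cfg tsb tsc k m (k + 1) new) (hsup : ∀ a : Nat, sup = a → a < k) :
    Placed cfg ts tsc sup 1 k (⟨ty, s, e, m, sup⟩ :: new) := by
  refine ⟨h2.len.trans h1.len, fun a ha => ?_, fun j hj => ?_, fun i hi hik => ?_⟩
  · have hak := hsup a ha
    rw [h2.other a (by omega) (Or.inl (by omega)), h1.sup_eq a ha]
  · cases j with
    | zero =>
      have hb := h1.new_eq 0 (by simp)
      simp only [Nat.add_zero, List.getD_cons_zero] at hb ⊢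
      rw [h2.sup_eq k rfl, hb]
      cases hl : cfg.parentLinks <;> simp [stampTok, hl]
    | succ j =>
      simp only [List.getD_cons_succ]
      have := h2.new_eq j (by simpa using hj)
      rw [show k + (j + 1) = k + 1 + j by omega, this,
        h1.other (k + 1 + j) (fun h => by have := hsup _ h.symm; omega) (Or.inr (by simp))]
  · have hne : i ≠ k := by
      rcases hik with h | h
      · omega
      · simp at h; omega
    rw [h2.other i (by omega) (by simp at hik; omega), h1.other i hi (by simp at hik ⊢; omega)]

/-- After a piece of text inside `a` the loop is still inside `a`. -/
theorem Inside.extend {cfg : Config} {ts ts' : Tokens} {a k : Nat} {m : Int} {new : List Token} (h : Inside cfg ts a k)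
    (hp : Placed cfg ts ts' a m k new) (hc : AllClosed new) (hpar : ParentsOk new k a) : Inside cfg ts' a (k + new.length) := by
  have hlt := h.lt
  refine ⟨by omega, ?_, fun i h1 h2 => ?_, fun hl i h1 h2 => ?_⟩
  · rw [hp.sup_eq a rfl]; exact h.isOpen
  · by_cases hik : i < k
    · rw [hp.other i (by omega) (Or.inl hik)]; exact h.closed i h1 hik
    · have := hp.new_eq (i - k) (by omega)
      rw [show k + (i - k) = i by omega] at this
      rw [this, stampTok_isOpen]; exact hc.getD _
  · by_cases hik : i < k
    · rw [hp.other i (by omega) (Or.inl hik)]; exact h.parents hl i h1 hik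
    · have := hp.new_eq (i - k) (by omega)
      rw [show k + (i - k) = i by omega] at this
      rw [this, stampTok_parent_links hl]
      rcases hpar (i - k) (by omega) with h' | h'
      · omega
      · omega

end Jsmn
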